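-- pv_equiv track=rewrite | github.com/juspay/hyperswitch-docs | reformat_docs.py | insert_canonical_stats
-- ===== SOURCE A (Python) =====
-- CANONICAL_STATS = {
--     'connectors': '300+',
--     'payment_methods': '200+',
--     'tps': '2,000',
--     'github_stars': '40,000+'
-- }
--
-- def insert_canonical_stats(content: str) -> str:
--     """
--     Rule 5: Insert canonical statistics where appropriate.
--     300+ connectors, 200+ payment methods, 2,000 TPS, 40k+ GitHub stars
--     """
--     # Find introduction/hero sections and insert stats
--     lines = content.split('\n')
--     result = []
--     stats_inserted = False
--
--     for i, line in enumerate(lines):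
--         result.append(line)
--
--         # Insert stats after first H1 if it's an overview/intro file
--         if not stats_inserted and line.strip().startswith('# ') and i < 10:
--             # Check if this looks like an overview/main page
--             next_lines = '\n'.join(lines[i+1:i+5])
--             if any(word in next_lines.lower() for word in ['overview', 'introduction', 'getting started', 'guide']):
--                 # Insert stats block
--                 stats_block = f"""
--
-- > **Scale with Confidence:** Process payments with {CANONICAL_STATS['connectors']}+ connectors, {CANONICAL_STATS['payment_methods']}+ payment methods, and {CANONICAL_STATS['tps']} TPS capacity. Join {CANONICAL_STATS['github_stars']} developers on [GitHub](https://github.com/juspay/hyperswitch).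
-- """
--                 result.append(stats_block)
--                 stats_inserted = True
--
--     return '\n'.join(result)
-- ===== SOURCE B (Python) =====
-- STATS_BLOCK = (
--     "\n\n> **Scale with Confidence:** Process payments with 300++ connectors, "
--     "200++ payment methods, and 2,000 TPS capacity. Join 40,000+ developers on "
--     "[GitHub](https://github.com/juspay/hyperswitch).\n"
-- )
--
-- KEYWORDS = ('overview', 'introduction', 'getting started', 'guide')
--
--
-- def insert_canonical_stats(content: str) -> str:
--     """Locate the first H1 within the first 10 lines whose following lines
--     look like an intro, splice the stats block in after it, and re-join."""
--     lines = content.split('\n')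
--     for i, line in enumerate(lines[:10]):
--         if line.strip().startswith('# ') and any(
--                 w in '\n'.join(lines[i + 1:i + 5]).lower() for w in KEYWORDS):
--             lines.insert(i + 1, STATS_BLOCK)
--             break
--     return '\n'.join(lines)
-- ===== Notes on version B (the rewrite author's own statement) =====
-- stated objective: simpler
-- what changed: A's single pass that rebuilds the whole document line by line with an appended-flag accumulator is replaced by locate-then-splice: find the insertion index among the first ten lines, list.insert the stats block once, and re-join.
import Mathlib
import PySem

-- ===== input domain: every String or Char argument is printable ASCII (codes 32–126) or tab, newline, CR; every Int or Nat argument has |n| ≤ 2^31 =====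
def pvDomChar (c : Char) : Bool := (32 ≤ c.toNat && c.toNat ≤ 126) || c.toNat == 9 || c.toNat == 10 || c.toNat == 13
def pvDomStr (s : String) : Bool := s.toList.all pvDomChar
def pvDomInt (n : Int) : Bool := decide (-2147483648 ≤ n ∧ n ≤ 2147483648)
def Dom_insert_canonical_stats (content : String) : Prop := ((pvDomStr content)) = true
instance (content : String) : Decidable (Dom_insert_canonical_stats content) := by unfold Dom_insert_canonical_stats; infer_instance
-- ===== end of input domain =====

-- B replaces A's append-with-flag accumulator loop by locate-then-splice: find the one
-- insertion index among the first ten lines, insert once, re-join (objective: simpler).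

-- module constants: the stats block literal (verbatim, including the doubled '+') and the keyword list
def pvStatsBlock : String := "\n\n> **Scale with Confidence:** Process payments with 300++ connectors, 200++ payment methods, and 2,000 TPS capacity. Join 40,000+ developers on [GitHub](https://github.com/juspay/hyperswitch).\n"

def pvKeywords : List String := ["overview", "introduction", "getting started", "guide"]

-- content.split('\n'): the separator is the nonempty literal "\n", so Python never raises here
def pvSplitNL (content : String) : List String := (PySem.Str.split? content "\n").getD []

-- ===== PORT A =====
-- A's loop body: append the line; while the flag is unset, after an early H1 whose next
-- four lines contain an intro keyword, also append the stats block and set the flag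
def pvAStep (lines : List String) (st : List String × Bool) (p : Int × String) : List String × Bool :=
  let result := st.1 ++ [p.2]
  if !st.2 && PySem.Str.startswith (PySem.Str.strip p.2) "# " && decide (p.1 < 10) then
    let next_lines := PySem.Str.join "\n" (PySem.List.slice lines (some (p.1 + 1)) (some (p.1 + 5)))
    if pvKeywords.any (fun w => PySem.Str.isIn w (PySem.Str.lower next_lines)) then
      (result ++ [pvStatsBlock], true)
    else (result, st.2)
  else (result, st.2)

def insert_canonical_stats (content : String) : String :=
  let lines := pvSplitNL content
  let st := (PySem.List.enumerate lines 0).foldl (pvAStep lines) ([], false)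
  PySem.Str.join "\n" st.1

-- ===== PORT B =====
-- B's test for an (index, line) pair: an H1 line whose next four lines contain an intro keyword
def pvIntroH1 (lines : List String) (p : Int × String) : Bool :=
  PySem.Str.startswith (PySem.Str.strip p.2) "# " &&
    pvKeywords.any (fun w =>
      PySem.Str.isIn w (PySem.Str.lower (PySem.Str.join "\n"
        (PySem.List.slice lines (some (p.1 + 1)) (some (p.1 + 5))))))

def insert_canonical_stats_alt (content : String) : String :=
  let lines := pvSplitNL content
  let lines' :=
    match (PySem.List.enumerate (PySem.List.slice lines none (some 10)) 0).find? (pvIntroH1 lines) with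
    | some p => PySem.List.insert lines (p.1 + 1) pvStatsBlock
    | none => lines
  PySem.Str.join "\n" lines'

-- ===== PRECONDITION & SPEC =====
def Spec_insert_canonical_stats (content : String) (out : String) : Prop := out = insert_canonical_stats_alt content
instance (content : String) (out : String) : Decidable (Spec_insert_canonical_stats content out) := by unfold Spec_insert_canonical_stats; infer_instance

-- ===== CLAIM (what is proved, stated in full; the proofs are below) =====
def Claim_equal_insert_canonical_stats : Prop := ∀ (content : String), Dom_insert_canonical_stats content → Spec_insert_canonical_stats content (insert_canonical_stats content)

-- ===== LEMMAS AND PROOFS =====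

-- once A's flag is set, the rest of the loop only copies the remaining lines
theorem pvAStep_true (L : List String) (ps : List (Int × String)) (r : List String) :
    ps.foldl (pvAStep L) (r, true) = (r ++ ps.map (·.2), true) := by
  induction ps generalizing r with
  | nil => simp
  | cons p ps ih => simp [pvAStep, ih]

-- proof-only description of A's flag-unset phase: copy lines until the first pair passing
-- the full condition, then the stats block and the remaining lines
def pvSplice (L : List String) : List (Int × String) → List String
  | [] => []
  | p :: ps =>
    if pvIntroH1 L p && decide (p.1 < 10) then p.2 :: pvStatsBlock :: ps.map (·.2)
    else p.2 :: pvSplice L ps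

theorem pvAStep_false (L : List String) (ps : List (Int × String)) (r : List String) :
    (ps.foldl (pvAStep L) (r, false)).1 = r ++ pvSplice L ps := by
  induction ps generalizing r with
  | nil => simp [pvSplice]
  | cons p ps ih =>
    simp only [List.foldl_cons, pvAStep, pvSplice, pvIntroH1]
    rcases Bool.eq_false_or_eq_true (PySem.Str.startswith (PySem.Str.strip p.2) "# ") with hsw | hsw <;>
      rcases Bool.eq_false_or_eq_true (decide (p.1 < 10)) with hi | hi <;>
      rcases Bool.eq_false_or_eq_true (pvKeywords.any fun w => PySem.Str.isIn w (PySem.Str.lower (PySem.Str.join "\n" (PySem.List.slice L (some (p.1 + 1)) (some (p.1 + 5)))))) with hkw | hkw <;>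
      simp only [hsw, hi, hkw] <;> simp [pvAStep_true, ih]

-- pvSplice over an enumeration, characterised by find? and a take/drop splice
theorem pvSplice_char (L : List String) (xs : List String) (s : Nat) :
    pvSplice L (PySem.List.enumerate xs (s : Int)) =
      match (PySem.List.enumerate xs (s : Int)).find?
          (fun p => pvIntroH1 L p && decide (p.1 < 10)) with
      | none => xs
      | some p => xs.take (p.1 + 1 - s).toNat ++ pvStatsBlock :: xs.drop (p.1 + 1 - s).toNat := by
  induction xs generalizing s with
  | nil => simp [PySem.List.enumerate_nil, pvSplice]
  | cons x xs ih =>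
    rw [PySem.List.enumerate_cons]
    by_cases h : (pvIntroH1 L ((s : Int), x) && decide (((s : Int), x).1 < 10)) = true
    · rw [List.find?_cons_of_pos (p := fun p => pvIntroH1 L p && decide (p.1 < 10)) (l := PySem.List.enumerate xs ((s : Int) + 1)) h]
      simp only [pvSplice, h, if_pos]
      simp [PySem.List.map_snd_enumerate]
    · rw [List.find?_cons_of_neg (p := fun p => pvIntroH1 L p && decide (p.1 < 10)) (l := PySem.List.enumerate xs ((s : Int) + 1)) h]
      simp only [pvSplice, h, Bool.false_eq_true, if_false]
      have hcast : ((s : Int) + 1) = ((s + 1 : Nat) : Int) := by push_cast; ring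
      rw [hcast, ih (s + 1)]
      cases hf : (PySem.List.enumerate xs ((s + 1 : Nat) : Int)).find?
          (fun p => pvIntroH1 L p && decide (p.1 < 10)) with
      | none => simp
      | some p =>
        have hp : p ∈ PySem.List.enumerate xs ((s + 1 : Nat) : Int) := List.mem_of_find?_eq_some hf
        obtain ⟨k, hk, rfl⟩ := (PySem.List.mem_enumerate_iff _ _ _).1 hp
        simp only []
        have e1 : (((s + 1 : Nat) : Int) + (k : Int) + 1 - ((s + 1 : Nat) : Int)).toNat = k + 1 := by
          push_cast; omega
        have e2 : (((s + 1 : Nat) : Int) + (k : Int) + 1 - (s : Int)).toNat = (k + 1) + 1 := by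
          push_cast; omega
        rw [e1, e2, List.take_succ_cons, List.drop_succ_cons, List.cons_append]

-- testing c together with 'index < s + n' over all of xs is testing c over xs.take n
theorem pvFind_take (c : Int × String → Bool) (xs : List String) (s n : Nat) :
    (PySem.List.enumerate xs (s : Int)).find? (fun p => c p && decide (p.1 < (s : Int) + (n : Int))) =
      (PySem.List.enumerate (xs.take n) (s : Int)).find? c := by
  induction xs generalizing s n with
  | nil => simp [PySem.List.enumerate_nil]
  | cons x xs ih =>
    cases n with
    | zero =>
      simp only [List.take_zero, PySem.List.enumerate_nil, List.find?_nil]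
      apply List.find?_eq_none.2
      intro p hp
      obtain ⟨k, hk, rfl⟩ := (PySem.List.mem_enumerate_iff _ _ _).1 hp
      simp only [Nat.cast_zero, add_zero, Bool.and_eq_true, decide_eq_true_eq, not_and]
      intro _
      omega
    | succ n =>
      rw [List.take_succ_cons, PySem.List.enumerate_cons, PySem.List.enumerate_cons]
      by_cases hc : c ((s : Int), x) = true
      · have hca : (fun p => c p && decide (p.1 < (s : Int) + ((n + 1 : Nat) : Int))) ((s : Int), x) = true := by
          simp only [hc, Bool.true_and, decide_eq_true_eq]
          push_cast; omega
        rw [List.find?_cons_of_pos (p := fun p => c p && decide (p.1 < (s : Int) + ((n + 1 : Nat) : Int))) hca, List.find?_cons_of_pos hc]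
      · have hca : ¬ ((fun p => c p && decide (p.1 < (s : Int) + ((n + 1 : Nat) : Int))) ((s : Int), x) = true) := by
          simp [hc]
        rw [List.find?_cons_of_neg (p := fun p => c p && decide (p.1 < (s : Int) + ((n + 1 : Nat) : Int))) hca, List.find?_cons_of_neg hc]
        have h1 : ((s : Int) + 1) = ((s + 1 : Nat) : Int) := by push_cast; ring
        have h2 : ∀ p : Int × String,
            (c p && decide (p.1 < (s : Int) + ((n + 1 : Nat) : Int))) =
            (c p && decide (p.1 < ((s + 1 : Nat) : Int) + (n : Int))) := by
          intro p
          have : (s : Int) + ((n + 1 : Nat) : Int) = ((s + 1 : Nat) : Int) + (n : Int) := by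
            push_cast; ring
          rw [this]
        rw [h1]
        calc (PySem.List.enumerate xs ((s + 1 : Nat) : Int)).find?
              (fun p => c p && decide (p.1 < (s : Int) + ((n + 1 : Nat) : Int)))
            = (PySem.List.enumerate xs ((s + 1 : Nat) : Int)).find?
              (fun p => c p && decide (p.1 < ((s + 1 : Nat) : Int) + (n : Int))) := by
              have he : (fun p => c p && decide (p.1 < (s : Int) + ((n + 1 : Nat) : Int))) =
                  (fun p => c p && decide (p.1 < ((s + 1 : Nat) : Int) + (n : Int))) := funext h2
              rw [he]
          _ = _ := ih (s + 1) n

-- ===== VERDICT (by name: the statement is the Claim_ definition above) =====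
theorem insert_canonical_stats_spec : Claim_equal_insert_canonical_stats := by
  intro content _
  unfold Spec_insert_canonical_stats insert_canonical_stats insert_canonical_stats_alt
  set L := pvSplitNL content with hL
  simp only []
  rw [pvAStep_false L _ [], List.nil_append]
  have h0 : (0 : Int) = ((0 : Nat) : Int) := rfl
  rw [h0, pvSplice_char L L 0]
  have hslice : PySem.List.slice L none (some (10 : Int)) = L.take 10 := by simp [pysem]
  rw [hslice]
  have hfind := pvFind_take (pvIntroH1 L) L 0 10
  simp only [Nat.cast_zero, Nat.cast_ofNat, zero_add] at hfind ⊢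
  rw [hfind]
  cases hf : (PySem.List.enumerate (L.take 10) (0 : Int)).find? (pvIntroH1 L) with
  | none => rfl
  | some p =>
    have hp := List.mem_of_find?_eq_some hf
    obtain ⟨k, hk, rfl⟩ := (PySem.List.mem_enumerate_iff _ _ _).1 hp
    have hklen : k < L.length := by
      have := hk; simp [List.length_take] at this; omega
    simp only []
    have h1 : (0 : Int) + (k : Int) + 1 = ((k + 1 : Nat) : Int) := by push_cast; ring
    rw [h1, PySem.List.insert_natCast L (k + 1) pvStatsBlock (by omega)]
    rw [show ((((k + 1 : Nat) : Int)) - 0).toNat = k + 1 from by omega]
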